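-- pv_equiv track=rewrite | github.com/Air2air/z-beam-generator | components/tags/validator.py | validate_tags_quality
-- ===== SOURCE A (Python) =====
-- from typing import Any, Dict, List
--
-- def validate_tags_quality(content: str) -> List[str]:
--     """
--     Validate tags quality requirements.
--
--     Args:
--         content: The tags content to validate
--
--     Returns:
--         List of validation warnings (empty if acceptable)
--     """
--     warnings = []
--
--     tags = [tag.strip() for tag in content.split(",") if tag.strip()]
--
--     # Check for good tag variety
--     technical_tags = sum(
--         1
--         for tag in tags
--         if any(
--             word in tag
--             for word in ["laser", "industrial", "surface", "precision", "cleaning"]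
--         )
--     )
--     application_tags = sum(
--         1
--         for tag in tags
--         if any(
--             word in tag
--             for word in ["automotive", "aerospace", "manufacturing", "medical"]
--         )
--     )
--
--     if technical_tags == 0:
--         warnings.append("Consider adding technical/process tags")
--     if application_tags == 0:
--         warnings.append("Consider adding application/industry tags")
--
--     # Check for overly generic tags
--     generic_tags = ["material", "process", "technology", "equipment"]
--     found_generic = [tag for tag in tags if tag in generic_tags]
--     if len(found_generic) > 2:
--         warnings.append(f"Consider replacing generic tags: {', '.join(found_generic)}")
--
--     return warnings
-- ===== SOURCE B (Python) =====
-- def validate_tags_quality(content: str):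
--     # Different algorithm: the technical/application keywords contain no comma and no
--     # whitespace, so they appear in some (stripped) tag iff they appear anywhere in the
--     # raw content -- no tokenization needed for those two checks.  Only the generic-tag
--     # check needs the tag tokens; empty tokens are never generic, so no emptiness filter.
--     warnings = []
--     if not any(w in content for w in
--                ("laser", "industrial", "surface", "precision", "cleaning")):
--         warnings.append("Consider adding technical/process tags")
--     if not any(w in content for w in
--                ("automotive", "aerospace", "manufacturing", "medical")):
--         warnings.append("Consider adding application/industry tags")
--     generic = ("material", "process", "technology", "equipment")
--     found_generic = [t for t in map(str.strip, content.split(",")) if t in generic]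
--     if len(found_generic) > 2:
--         warnings.append("Consider replacing generic tags: " + ", ".join(found_generic))
--     return warnings
-- ===== Notes on version B (the rewrite author's own statement) =====
-- stated objective: alternative
-- what changed: B decides the technical/application warnings by substring search over the raw content string (no splitting or stripping at all for those checks; correct because the keywords contain no comma and no whitespace), and builds found_generic directly from the stripped split pieces without A's emptiness filter (empty pieces are never in the generic set).
import Mathlib
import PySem

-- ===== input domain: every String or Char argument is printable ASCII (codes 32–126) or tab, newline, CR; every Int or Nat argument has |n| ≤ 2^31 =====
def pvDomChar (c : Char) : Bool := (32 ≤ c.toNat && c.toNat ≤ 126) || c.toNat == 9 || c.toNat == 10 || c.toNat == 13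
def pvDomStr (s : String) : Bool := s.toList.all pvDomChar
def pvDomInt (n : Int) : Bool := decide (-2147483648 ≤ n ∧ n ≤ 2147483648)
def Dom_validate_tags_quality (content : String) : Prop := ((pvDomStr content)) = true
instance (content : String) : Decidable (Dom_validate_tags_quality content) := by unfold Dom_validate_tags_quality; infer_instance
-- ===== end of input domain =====

-- B decides the technical/application warnings by substring search on the raw content
-- (no splitting/stripping for those checks; the keywords contain no comma and no
-- whitespace) and builds found_generic from the stripped pieces without the emptiness
-- filter (objective: alternative algorithm, same cost).

-- ===== PORT A =====
def validate_tags_quality (content : String) : List String :=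
  let tags : List String :=
    (((PySem.Str.split? content ",").getD []).map PySem.Str.strip).filter (fun t => t ≠ "")
  let technical_tags : Int :=
    tags.foldl (fun acc tag =>
      if ["laser", "industrial", "surface", "precision", "cleaning"].any
          (fun word => PySem.Str.isIn word tag) then acc + 1 else acc) 0
  let application_tags : Int :=
    tags.foldl (fun acc tag =>
      if ["automotive", "aerospace", "manufacturing", "medical"].any
          (fun word => PySem.Str.isIn word tag) then acc + 1 else acc) 0
  let warnings : List String := []
  let warnings := if technical_tags = 0 then warnings ++ ["Consider adding technical/process tags"] else warnings
  let warnings := if application_tags = 0 then warnings ++ ["Consider adding application/industry tags"] else warnings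
  let generic_tags : List String := ["material", "process", "technology", "equipment"]
  let found_generic : List String := tags.filter (fun tag => generic_tags.contains tag)
  let warnings := if found_generic.length > 2 then
      warnings ++ ["Consider replacing generic tags: " ++ PySem.Str.join ", " found_generic]
    else warnings
  warnings

-- ===== PORT B =====
def validate_tags_quality_alt (content : String) : List String :=
  let warnings : List String := []
  let warnings := if !(["laser", "industrial", "surface", "precision", "cleaning"].any
      (fun w => PySem.Str.isIn w content)) then warnings ++ ["Consider adding technical/process tags"] else warnings
  let warnings := if !(["automotive", "aerospace", "manufacturing", "medical"].any
      (fun w => PySem.Str.isIn w content)) then warnings ++ ["Consider adding application/industry tags"] else warnings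
  let generic : List String := ["material", "process", "technology", "equipment"]
  let found_generic : List String :=
    (((PySem.Str.split? content ",").getD []).map PySem.Str.strip).filter (fun t => generic.contains t)
  let warnings := if found_generic.length > 2 then
      warnings ++ ["Consider replacing generic tags: " ++ PySem.Str.join ", " found_generic]
    else warnings
  warnings

-- ===== PRECONDITION & SPEC =====
def Spec_validate_tags_quality (content : String) (out : List String) : Prop := out = validate_tags_quality_alt content
instance (content : String) (out : List String) : Decidable (Spec_validate_tags_quality content out) := by unfold Spec_validate_tags_quality; infer_instance

-- ===== CLAIM (what is proved, stated in full; the proofs are below) =====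
def Claim_equal_validate_tags_quality : Prop := ∀ (content : String), Dom_validate_tags_quality content → Spec_validate_tags_quality content (validate_tags_quality content)

-- ===== LEMMAS AND PROOFS =====

-- Functional model of splitting on a single comma.
def split1 : List Char → List (List Char)
  | [] => [[]]
  | c :: rest =>
    if c = ',' then [] :: split1 rest
    else
      match split1 rest with
      | [] => [[c]]
      | p :: ps => (c :: p) :: ps

theorem split1_ne_nil (s : List Char) : split1 s ≠ [] := by
  cases s with
  | nil => simp [split1]
  | cons c rest =>
    simp only [split1]
    split_ifs
    · simp
    · cases h : split1 rest <;> simp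

theorem go_eq_nil (sep : List Char) (fuel : Nat) (cur : List Char) (acc : List (List Char)) :
    PySem.Chars.splitOn.go sep (fuel+1) [] cur acc = (cur.reverse :: acc).reverse := rfl

theorem go_eq_cons (sep : List Char) (fuel : Nat) (c : Char) (rest cur : List Char)
    (acc : List (List Char)) :
    PySem.Chars.splitOn.go sep (fuel+1) (c :: rest) cur acc =
      if sep.isPrefixOf (c :: rest) then
        PySem.Chars.splitOn.go sep fuel (List.drop sep.length (c :: rest)) [] (cur.reverse :: acc)
      else PySem.Chars.splitOn.go sep fuel rest (c :: cur) acc := rfl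

theorem go_spec : ∀ (fuel : Nat) (l cur : List Char) (acc : List (List Char)),
    l.length < fuel → ∀ (p : List Char) (ps : List (List Char)), split1 l = p :: ps →
    PySem.Chars.splitOn.go [','] fuel l cur acc = acc.reverse ++ (cur.reverse ++ p) :: ps := by
  intro fuel
  induction fuel with
  | zero => intro l cur acc h; omega
  | succ fuel ih =>
    intro l cur acc h p ps hsp
    cases l with
    | nil =>
      rw [go_eq_nil]
      simp only [split1] at hsp
      have h1 : p = [] ∧ ps = [] := by simpa [eq_comm] using hsp
      obtain ⟨rfl, rfl⟩ := h1
      simp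
    | cons c rest =>
      rw [go_eq_cons]
      obtain ⟨q, qs, hq⟩ := List.exists_cons_of_ne_nil (split1_ne_nil rest)
      by_cases hcm : c = ','
      · subst hcm
        have hpre : [','].isPrefixOf (',' :: rest) = true := by simp [List.isPrefixOf]
        rw [if_pos hpre]
        simp only [split1, hq] at hsp
        have h1 : p = [] ∧ ps = q :: qs := by simpa [eq_comm] using hsp
        obtain ⟨rfl, rfl⟩ := h1
        show PySem.Chars.splitOn.go [','] fuel rest [] (cur.reverse :: acc) = _
        rw [ih rest [] (cur.reverse :: acc) (by simp at h ⊢; omega) q qs hq]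
        simp
      · have hbc : (',' == c) = false := by
          simp only [beq_eq_false_iff_ne]; exact fun hcc => hcm hcc.symm
        have hpre : [','].isPrefixOf (c :: rest) = false := by
          simp [List.isPrefixOf, hbc]
        rw [if_neg (by simp [hpre])]
        simp only [split1, if_neg hcm, hq] at hsp
        have h1 : p = c :: q ∧ ps = qs := by simpa [eq_comm] using hsp
        rw [h1.1, h1.2]
        rw [ih rest (c :: cur) acc (by simp at h ⊢; omega) q qs hq]
        simp

theorem splitOn_comma (s : List Char) : PySem.Chars.splitOn s [','] = split1 s := by
  obtain ⟨p, ps, hq⟩ := List.exists_cons_of_ne_nil (split1_ne_nil s)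
  show PySem.Chars.splitOn.go [','] (s.length + 1) s [] [] = _
  rw [go_spec (s.length + 1) s [] [] (by omega) p ps hq, hq]
  simp

def glue : List (List Char) → List Char
  | [] => []
  | [p] => p
  | p :: q :: qs => p ++ ',' :: glue (q :: qs)

theorem glue_split1 (s : List Char) : glue (split1 s) = s := by
  induction s with
  | nil => rfl
  | cons c rest ih =>
    obtain ⟨q, qs, hq⟩ := List.exists_cons_of_ne_nil (split1_ne_nil rest)
    by_cases hcm : c = ','
    · subst hcm
      simp only [split1, hq]
      show ',' :: glue (q :: qs) = ',' :: rest
      rw [← hq, ih]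
    · simp only [split1, if_neg hcm, hq]
      cases qs with
      | nil =>
        show c :: q = c :: rest
        rw [show q = glue (split1 rest) by rw [hq]; rfl, ih]
      | cons r rs =>
        show (c :: q) ++ ',' :: glue (r :: rs) = c :: rest
        rw [show (c :: q) ++ ',' :: glue (r :: rs) = c :: (q ++ ',' :: glue (r :: rs)) from rfl]
        rw [show q ++ ',' :: glue (r :: rs) = glue (q :: r :: rs) from rfl, ← hq, ih]

-- position inside the middle block of an occurrence
theorem mem_of_between {α : Type} (s w t : List α) (i : Nat) (h1 : s.length ≤ i)
    (h2 : i < s.length + w.length) :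
    ∃ c, (s ++ w ++ t)[i]? = some c ∧ c ∈ w := by
  rw [List.append_assoc, List.getElem?_append_right h1, List.getElem?_append_left (by omega)]
  have hi : i - s.length < w.length := by omega
  exact ⟨w[i - s.length], List.getElem?_eq_getElem hi, List.getElem_mem hi⟩

theorem occ_mid {α : Type} {s w t u m v : List α} (h : s ++ w ++ t = u ++ m ++ v)
    (h1 : u.length ≤ s.length) (h2 : s.length + w.length ≤ u.length + m.length) :
    w <:+: m := by
  have hu : u <+: s := by
    refine List.prefix_of_prefix_length_le ⟨m ++ v, ?_⟩ ⟨w ++ t, (List.append_assoc s w t).symm⟩ h1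
    simpa [List.append_assoc] using h.symm
  obtain ⟨s', rfl⟩ := hu
  have h' : s' ++ (w ++ t) = m ++ v := by
    have h0 := h
    simp only [List.append_assoc] at h0
    exact List.append_cancel_left h0
  have hpw : s' ++ w <+: m := by
    refine List.prefix_of_prefix_length_le ⟨t, ?_⟩ (List.prefix_append m v) ?_
    · simpa [List.append_assoc] using h'
    · simp only [List.length_append] at h1 h2 ⊢; omega
  exact (List.suffix_append s' w).isInfix.trans hpw.isInfix

theorem comma_append_iff {w : List Char} (hc : (',' : Char) ∉ w)
    (a b : List Char) : w <:+: a ++ ',' :: b ↔ w <:+: a ∨ w <:+: b := by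
  constructor
  · rintro ⟨s, t, h⟩
    by_cases hA : s.length + w.length ≤ a.length
    · exact Or.inl (occ_mid (s := s) (t := t) (u := []) (m := a) (v := ',' :: b)
        (by simpa using h) (by simp) (by simpa using hA))
    · by_cases hB : a.length + 1 ≤ s.length
      · right
        have hlen := congrArg List.length h
        simp only [List.length_append, List.length_cons] at hlen
        refine occ_mid (s := s) (t := t) (u := a ++ [',']) (m := b) (v := ([] : List Char))
          ?_ ?_ ?_
        · simpa [List.append_assoc] using h
        · simp; omega
        · simp; omega
      · exfalso
        obtain ⟨c, hc1, hc2⟩ := mem_of_between s w t a.length (by omega) (by omega)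
        rw [h] at hc1
        have h2 : (a ++ ',' :: b)[a.length]? = some ',' := by
          rw [show a ++ ',' :: b = (a ++ [',']) ++ b from by simp,
            List.getElem?_append_left (by simp),
            List.getElem?_append_right (le_refl a.length)]
          simp
        rw [h2] at hc1
        have hcc : c = ',' := (Option.some_inj.mp hc1).symm
        exact hc (hcc ▸ hc2)
  · rintro (h | h)
    · exact h.trans (List.prefix_append a (',' :: b)).isInfix
    · exact h.trans ((show b <:+ ',' :: b from ⟨[','], rfl⟩).trans
        (List.suffix_append a (',' :: b))).isInfix

theorem isIn_comma_append {w : List Char} (hc : (',' : Char) ∉ w)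
    (a b : List Char) :
    PySem.Chars.isIn w (a ++ ',' :: b) = (PySem.Chars.isIn w a || PySem.Chars.isIn w b) := by
  rw [Bool.eq_iff_iff, Bool.or_eq_true, PySem.Chars.isIn_iff_infix, PySem.Chars.isIn_iff_infix,
    PySem.Chars.isIn_iff_infix]
  exact comma_append_iff hc a b

theorem isIn_glue {w : List Char} (hc : (',' : Char) ∉ w) :
    ∀ ps : List (List Char), ps ≠ [] →
      (ps.any (fun p => PySem.Chars.isIn w p)) = PySem.Chars.isIn w (glue ps) := by
  intro ps
  induction ps with
  | nil => simp
  | cons p rest ih =>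
    intro _
    cases rest with
    | nil => simp [glue]
    | cons q qs =>
      show (PySem.Chars.isIn w p || (q :: qs).any _) = _
      rw [show glue (p :: q :: qs) = p ++ ',' :: glue (q :: qs) from rfl,
        isIn_comma_append hc, ih (by simp)]

theorem space_mid {w : List Char} (hne : w ≠ [])
    (hsw : ∀ c ∈ w, PySem.Chars.isspace c = false) {u m v : List Char}
    (hu : ∀ c ∈ u, PySem.Chars.isspace c = true) (hv : ∀ c ∈ v, PySem.Chars.isspace c = true)
    (hinf : w <:+: u ++ m ++ v) : w <:+: m := by
  obtain ⟨s, t, h⟩ := hinf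
  have hwpos : 0 < w.length := List.length_pos_of_ne_nil hne
  by_cases c1 : s.length < u.length
  · exfalso
    obtain ⟨c, hc1, hc2⟩ := mem_of_between s w t s.length (le_refl _) (by omega)
    rw [h, List.append_assoc, List.getElem?_append_left c1] at hc1
    have hsp := hu c (List.mem_of_getElem? hc1)
    rw [hsw c hc2] at hsp
    exact Bool.false_ne_true hsp
  · by_cases c2 : u.length + m.length < s.length + w.length
    · exfalso
      obtain ⟨c, hc1, hc2⟩ := mem_of_between s w t (s.length + w.length - 1) (by omega) (by omega)
      rw [h, List.getElem?_append_right (by simp; omega)] at hc1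
      have hsp := hv c (List.mem_of_getElem? hc1)
      rw [hsw c hc2] at hsp
      exact Bool.false_ne_true hsp
    · exact occ_mid h (by omega) (by omega)

theorem strip_decomp (p : List Char) :
    ∃ u v, p = u ++ PySem.Chars.strip p ++ v ∧ (∀ c ∈ u, PySem.Chars.isspace c = true) ∧
      (∀ c ∈ v, PySem.Chars.isspace c = true) := by
  refine ⟨List.takeWhile PySem.Chars.isspace p,
    (List.takeWhile PySem.Chars.isspace (PySem.Chars.lstrip p).reverse).reverse, ?_, ?_, ?_⟩
  · have h2 : PySem.Chars.rstrip (PySem.Chars.lstrip p)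
        ++ (List.takeWhile PySem.Chars.isspace (PySem.Chars.lstrip p).reverse).reverse
        = PySem.Chars.lstrip p := by
      show (List.dropWhile _ _).reverse ++ _ = _
      rw [← List.reverse_append, List.takeWhile_append_dropWhile, List.reverse_reverse]
    show p = _ ++ PySem.Chars.rstrip (PySem.Chars.lstrip p) ++ _
    rw [List.append_assoc, h2]
    show p = List.takeWhile _ p ++ List.dropWhile _ p
    rw [List.takeWhile_append_dropWhile]
  · exact fun c hc => List.mem_takeWhile_imp hc
  · intro c hc
    rw [List.mem_reverse] at hc
    exact List.mem_takeWhile_imp hc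

theorem strip_isIn {w : List Char} (hne : w ≠ [])
    (hsw : ∀ c ∈ w, PySem.Chars.isspace c = false) (p : List Char) :
    PySem.Chars.isIn w (PySem.Chars.strip p) = PySem.Chars.isIn w p := by
  obtain ⟨u, v, hp, hu, hv⟩ := strip_decomp p
  rw [Bool.eq_iff_iff, PySem.Chars.isIn_iff_infix, PySem.Chars.isIn_iff_infix]
  constructor
  · intro h
    exact h.trans ⟨u, v, hp.symm⟩
  · intro h
    rw [hp] at h
    exact space_mid hne hsw hu hv h

theorem chars_key {w : List Char} (hne : w ≠ []) (hc : (',' : Char) ∉ w)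
    (hsw : ∀ c ∈ w, PySem.Chars.isspace c = false) (cs : List Char) :
    (((split1 cs).map PySem.Chars.strip).filter (fun t => !t.isEmpty)).any
        (fun t => PySem.Chars.isIn w t) = PySem.Chars.isIn w cs := by
  rw [List.any_filter, List.any_map]
  have hstep : ∀ p ∈ split1 cs,
      ((fun a => (!a.isEmpty) && PySem.Chars.isIn w a) ∘ PySem.Chars.strip) p
        = PySem.Chars.isIn w p := by
    intro p _
    simp only [Function.comp_apply]
    rw [strip_isIn hne hsw p]
    cases hsp : (PySem.Chars.strip p).isEmpty
    · simp
    · have hnil : PySem.Chars.strip p = [] := by simpa using hsp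
      have : PySem.Chars.isIn w p = false := by
        rw [← strip_isIn hne hsw p, hnil]
        rw [Bool.eq_false_iff]
        intro hx
        exact hne (List.infix_nil.mp ((PySem.Chars.isIn_iff_infix _ _).mp hx))
      simp [this]
  rw [PySem.List.any_congr_mem hstep, isIn_glue hc _ (split1_ne_nil cs), glue_split1]

-- the pieces of content.split(",") on the String side
theorem split_str (content : String) :
    (PySem.Str.split? content ",").getD []
      = (split1 content.toList).map String.ofList := by
  have hsep : (",".toList) = [','] := rfl
  simp [PySem.Str.split?, PySem.Chars.split?, hsep, splitOn_comma]

theorem strip_ofList (p : List Char) :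
    PySem.Str.strip (String.ofList p) = String.ofList (PySem.Chars.strip p) := by
  conv_lhs => rw [← String.ofList_toList (s := PySem.Str.strip (String.ofList p))]
  rw [PySem.Str.toList_strip, String.toList_ofList]

theorem ofList_ne_empty (m : List Char) : (decide (String.ofList m ≠ "")) = !m.isEmpty := by
  cases m with
  | nil => simp
  | cons c cs =>
    have : String.ofList (c :: cs) ≠ "" := by
      intro h
      have := congrArg String.toList h
      simp at this
    simp [this]

-- A's cleaned tag list, with a per-tag Bool test pushed down to char level
theorem tags_any_key (w content : String) (hne : w.toList ≠ [])
    (hc : (',' : Char) ∉ w.toList)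
    (hsw : ∀ c ∈ w.toList, PySem.Chars.isspace c = false) :
    ((((PySem.Str.split? content ",").getD []).map PySem.Str.strip).filter
        (fun t => t ≠ "")).any (fun t => PySem.Str.isIn w t)
      = PySem.Str.isIn w content := by
  rw [split_str]
  rw [show ((split1 content.toList).map String.ofList).map PySem.Str.strip
      = ((split1 content.toList).map PySem.Chars.strip).map String.ofList by
    rw [List.map_map, List.map_map]; exact List.map_congr_left (fun p _ => strip_ofList p)]
  rw [List.filter_map, List.any_map]
  rw [PySem.Str.isIn_eq]
  rw [← chars_key hne hc hsw content.toList]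
  rw [show (List.filter ((fun t => t ≠ "") ∘ String.ofList) ((split1 content.toList).map PySem.Chars.strip))
      = (List.filter (fun t => !t.isEmpty) ((split1 content.toList).map PySem.Chars.strip)) from
    List.filter_congr (fun m _ => ofList_ne_empty m)]
  refine PySem.List.any_congr_mem ?_
  intro m _
  show PySem.Str.isIn w (String.ofList m) = _
  rw [PySem.Str.isIn_eq, String.toList_ofList]

theorem any_swap {α β : Type} (l : List α) (m : List β) (f : α → β → Bool) :
    l.any (fun a => m.any (f a)) = m.any (fun b => l.any (fun a => f a b)) := by
  rw [Bool.eq_iff_iff]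
  simp only [List.any_eq_true]
  constructor
  · rintro ⟨x, hx, y, hy, h⟩; exact ⟨y, hy, x, hx, h⟩
  · rintro ⟨y, hy, x, hx, h⟩; exact ⟨x, hx, y, hy, h⟩

theorem cond_key (tags : List String) (content : String) (ws : List String)
    (hws : ∀ w ∈ ws, w.toList ≠ [] ∧ (',' : Char) ∉ w.toList ∧
      ∀ c ∈ w.toList, PySem.Chars.isspace c = false)
    (htags : tags = (((PySem.Str.split? content ",").getD []).map PySem.Str.strip).filter
      (fun t => t ≠ "")) :
    (tags.foldl (fun acc tag =>
        if ws.any (fun word => PySem.Str.isIn word tag) then acc + 1 else acc) (0 : Int) = 0)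
      ↔ ((!(ws.any (fun w => PySem.Str.isIn w content))) = true) := by
  rw [PySem.List.foldl_if_add_one, zero_add, Int.natCast_eq_zero, List.countP_eq_zero,
    ← List.any_eq_false, Bool.not_eq_true']
  suffices hsuf : tags.any (fun tag => ws.any (fun word => PySem.Str.isIn word tag))
      = ws.any (fun w => PySem.Str.isIn w content) by rw [hsuf]
  rw [any_swap tags ws (fun t w => PySem.Str.isIn w t)]
  refine PySem.List.any_congr_mem ?_
  intro w hw
  obtain ⟨h1, h2, h3⟩ := hws w hw
  rw [htags]
  exact tags_any_key w content h1 h2 h3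

theorem generic_key (content : String) :
    ((((PySem.Str.split? content ",").getD []).map PySem.Str.strip).filter
        (fun t => t ≠ "")).filter
      (fun tag => (["material", "process", "technology", "equipment"] : List String).contains tag)
      = (((PySem.Str.split? content ",").getD []).map PySem.Str.strip).filter
        (fun t => (["material", "process", "technology", "equipment"] : List String).contains t) := by
  rw [List.filter_filter]
  refine List.filter_congr ?_
  intro t _
  by_cases ht : t = ""
  · subst ht; decide
  · simp [ht]

-- ===== VERDICT (by name: the statement is the Claim_ definition above) =====
theorem wordOK_of (w : String) (cs : List Char) (h : w.toList = cs) (h1 : cs ≠ [])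
    (h2 : (',' : Char) ∉ cs) (h3 : ∀ c ∈ cs, PySem.Chars.isspace c = false) :
    w.toList ≠ [] ∧ (',' : Char) ∉ w.toList ∧ ∀ c ∈ w.toList, PySem.Chars.isspace c = false := by
  rw [h]; exact ⟨h1, h2, h3⟩

theorem validate_tags_quality_spec : Claim_equal_validate_tags_quality := by
  intro content _
  unfold Spec_validate_tags_quality
  simp only [validate_tags_quality, validate_tags_quality_alt]
  have e1 := cond_key _ content ["laser", "industrial", "surface", "precision", "cleaning"]
    (by intro w hw
        simp only [List.mem_cons, List.not_mem_nil, or_false] at hw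
        rcases hw with rfl | rfl | rfl | rfl | rfl
        · exact wordOK_of _ ['l','a','s','e','r'] rfl (by decide) (by decide) (by simp [PySem.Chars.isspace])
        · exact wordOK_of _ ['i','n','d','u','s','t','r','i','a','l'] rfl (by decide) (by decide)
            (by simp [PySem.Chars.isspace])
        · exact wordOK_of _ ['s','u','r','f','a','c','e'] rfl (by decide) (by decide) (by simp [PySem.Chars.isspace])
        · exact wordOK_of _ ['p','r','e','c','i','s','i','o','n'] rfl (by decide) (by decide)
            (by simp [PySem.Chars.isspace])
        · exact wordOK_of _ ['c','l','e','a','n','i','n','g'] rfl (by decide) (by decide)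
            (by simp [PySem.Chars.isspace])) rfl
  have e2 := cond_key _ content ["automotive", "aerospace", "manufacturing", "medical"]
    (by intro w hw
        simp only [List.mem_cons, List.not_mem_nil, or_false] at hw
        rcases hw with rfl | rfl | rfl | rfl
        · exact wordOK_of _ ['a','u','t','o','m','o','t','i','v','e'] rfl (by decide) (by decide)
            (by simp [PySem.Chars.isspace])
        · exact wordOK_of _ ['a','e','r','o','s','p','a','c','e'] rfl (by decide) (by decide)
            (by simp [PySem.Chars.isspace])
        · exact wordOK_of _ ['m','a','n','u','f','a','c','t','u','r','i','n','g'] rfl (by decide)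
            (by decide) (by simp [PySem.Chars.isspace])
        · exact wordOK_of _ ['m','e','d','i','c','a','l'] rfl (by decide) (by decide)
            (by simp [PySem.Chars.isspace])) rfl
  simp only [e1, e2, generic_key content]
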